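-- pv_equiv track=rewrite | github.com/zeus483/TenLib | tenlib/orchestrator.py | _snap_split_index
-- ===== SOURCE A (Python) =====
-- def _snap_split_index(text: str, target: int, start: int) -> int:
--     """
--     Ajusta el corte a un límite natural cercano (salto de línea o puntuación).
--     """
--     if start >= len(text):
--         return len(text)
--
--     min_idx = start + 1
--     max_idx = len(text) - 1
--
--     if min_idx > max_idx:
--         return len(text)
--
--     target = max(min_idx, min(target, max_idx))
--     window = 120
--
--     for radius in range(window + 1):
--         left = target - radius
--         right = target + radius
--
--         if left >= min_idx and _is_natural_break(text, left):
--             return left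
--         if right <= max_idx and _is_natural_break(text, right):
--             return right
--
--     return target
--
-- def _is_natural_break(text: str, idx: int) -> bool:
--     prev_char = text[idx - 1] if idx > 0 else ""
--     curr_char = text[idx] if idx < len(text) else ""
--
--     if prev_char == "\n":
--         return True
--
--     if prev_char in ".?!;:" and (curr_char.isspace() or curr_char == "\n"):
--         return True
--
--     return False
-- ===== SOURCE B (Python) =====
-- def _snap_split_index(text: str, target: int, start: int) -> int:
--     """
--     Ajusta el corte a un límite natural cercano (salto de línea o puntuación).
--     """
--     if start >= len(text):
--         return len(text)
--
--     min_idx = start + 1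
--     max_idx = len(text) - 1
--
--     if min_idx > max_idx:
--         return len(text)
--
--     target = max(min_idx, min(target, max_idx))
--     lo = max(min_idx, target - 120)
--     hi = min(max_idx, target + 120)
--
--     best = None
--     for i in range(lo, hi + 1):
--         if _is_natural_break(text, i) and (best is None or abs(i - target) < abs(best - target)):
--             best = i
--
--     return target if best is None else best
--
-- def _is_natural_break(text: str, idx: int) -> bool:
--     prev_char = text[idx - 1] if idx > 0 else ""
--     curr_char = text[idx] if idx < len(text) else ""
--
--     if prev_char == "\n":
--         return True
--
--     if prev_char in ".?!;:" and (curr_char.isspace() or curr_char == "\n"):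
--         return True
--
--     return False
-- ===== Notes on version B (the rewrite author's own statement) =====
-- stated objective: alternative
-- what changed: Replaces the expanding-radius early-exit search around the clamped target with a single ascending pass over the +/-120 window that keeps the break index minimizing (|i-target|, i) (ties to the smaller index), returning target if the window has no break.
-- outside the precondition, e.g. on _snap_split_index(' x', 0, -10): A returns 0, B raises IndexError
import Mathlib
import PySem

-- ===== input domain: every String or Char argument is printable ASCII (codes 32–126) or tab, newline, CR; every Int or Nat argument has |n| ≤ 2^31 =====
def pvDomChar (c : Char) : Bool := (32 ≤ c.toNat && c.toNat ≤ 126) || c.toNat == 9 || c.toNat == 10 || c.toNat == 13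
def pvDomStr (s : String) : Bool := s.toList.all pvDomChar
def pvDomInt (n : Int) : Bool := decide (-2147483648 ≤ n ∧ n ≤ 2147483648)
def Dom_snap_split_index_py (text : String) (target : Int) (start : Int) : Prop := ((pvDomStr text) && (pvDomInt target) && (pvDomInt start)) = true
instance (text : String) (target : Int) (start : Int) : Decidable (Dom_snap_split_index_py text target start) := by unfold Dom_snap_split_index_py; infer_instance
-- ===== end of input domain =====

-- B replaces A's expanding-radius early-exit search with one ascending pass over the ±120
-- window keeping the natural-break index that minimizes (|i-target|, i); same cost, different decomposition.

-- ===== PORT A =====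
-- helper _is_natural_break, shared by both Python sources; "" (no char) is modelled as none.
-- Python's '"" in ".?!;:"' is True (empty substring), hence the none-branch returns true;
-- '"".isspace()' is False, hence the none-branch returns false. Exact on indices with -len ≤ idx
-- (below that Python raises IndexError; such calls are excluded by Pre_).
def isNaturalBreak (text : String) (idx : Int) : Bool :=
  let prev : Option Char := if idx > 0 then PySem.Str.pyGet? text (idx - 1) else none
  let curr : Option Char := if idx < PySem.Str.len text then PySem.Str.pyGet? text idx else none
  if prev == some '\n' then true
  else if (match prev with | none => true | some c => ".?!;:".toList.contains c)
          && (match curr with | none => false | some c => PySem.Chars.isspace c || c == '\n') then true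
  else false

-- the 'for radius in range(window + 1)' loop with its two early returns
def snapLoopA (text : String) (minIdx maxIdx target : Int) : List Int → Int
  | [] => target
  | r :: rest =>
    let left := target - r
    let right := target + r
    if left ≥ minIdx && isNaturalBreak text left then left
    else if right ≤ maxIdx && isNaturalBreak text right then right
    else snapLoopA text minIdx maxIdx target rest

def snap_split_index_py (text : String) (target : Int) (start : Int) : Int :=
  let n := PySem.Str.len text
  if start ≥ n then n
  else
    let minIdx := start + 1
    let maxIdx := n - 1
    if minIdx > maxIdx then n
    else
      let t := max minIdx (min target maxIdx)
      snapLoopA text minIdx maxIdx t (PySem.List.pyRange 0 (120 + 1) 1)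

-- ===== PORT B =====
-- the 'for i in range(lo, hi + 1)' pass keeping the best (closest, leftmost-on-tie) break
def snapScanB (text : String) (target : Int) (best : Option Int) : List Int → Option Int
  | [] => best
  | i :: rest =>
    if isNaturalBreak text i &&
       (match best with | none => true | some b => (i - target).natAbs < (b - target).natAbs)
    then snapScanB text target (some i) rest
    else snapScanB text target best rest

def snap_split_index_py_alt (text : String) (target : Int) (start : Int) : Int :=
  let n := PySem.Str.len text
  if start ≥ n then n
  else
    let minIdx := start + 1
    let maxIdx := n - 1
    if minIdx > maxIdx then n
    else
      let t := max minIdx (min target maxIdx)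
      let lo := max minIdx (t - 120)
      let hi := min maxIdx (t + 120)
      match snapScanB text t none (PySem.List.pyRange lo (hi + 1) 1) with
      | none => t
      | some b => b

-- ===== PRECONDITION & SPEC =====
-- Pre_ excludes start < -len(text): there A's ±120 probe can evaluate text[idx] with idx < -len(text)
-- and raise IndexError (on the few such inputs where a wrapped-around break is met first A still
-- returns a negative-wraparound value, while B's ascending scan raises; both are accidents of
-- negative-index wraparound outside the function's natural domain).
def Pre_snap_split_index_py (text : String) (target : Int) (start : Int) : Prop :=
  -(PySem.Str.len text) ≤ start
instance (text : String) (target : Int) (start : Int) : Decidable (Pre_snap_split_index_py text target start) := by unfold Pre_snap_split_index_py; infer_instance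

def pvWitness_snap_split_index_py : String × Int × Int := ("ab. cd", 4, 0)

def Spec_snap_split_index_py (text : String) (target : Int) (start : Int) (out : Int) : Prop := out = snap_split_index_py_alt text target start
instance (text : String) (target : Int) (start : Int) (out : Int) : Decidable (Spec_snap_split_index_py text target start out) := by unfold Spec_snap_split_index_py; infer_instance

-- ===== CLAIM (what is proved, stated in full; the proofs are below) =====
def Claim_equal_snap_split_index_py : Prop := ∀ (text : String) (target : Int) (start : Int), Dom_snap_split_index_py text target start → Pre_snap_split_index_py text target start → Spec_snap_split_index_py text target start (snap_split_index_py text target start)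

-- ===== LEMMAS AND PROOFS =====

-- Option-valued version of A's loop, for composing over list appends
def findA (text : String) (minIdx maxIdx target : Int) : List Int → Option Int
  | [] => none
  | r :: rest =>
    if (target - r ≥ minIdx) && isNaturalBreak text (target - r) then some (target - r)
    else if (target + r ≤ maxIdx) && isNaturalBreak text (target + r) then some (target + r)
    else findA text minIdx maxIdx target rest

theorem findA_cons (text : String) (lo hi t r : Int) (L : List Int) :
    findA text lo hi t (r :: L)
      = if lo ≤ t - r ∧ isNaturalBreak text (t - r) = true then some (t - r)
        else if t + r ≤ hi ∧ isNaturalBreak text (t + r) = true then some (t + r)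
        else findA text lo hi t L := by
  simp only [findA, ge_iff_le, Bool.and_eq_true, decide_eq_true_eq]

theorem findA_singleton (text : String) (lo hi t r : Int) :
    findA text lo hi t [r]
      = if lo ≤ t - r ∧ isNaturalBreak text (t - r) = true then some (t - r)
        else if t + r ≤ hi ∧ isNaturalBreak text (t + r) = true then some (t + r)
        else none := findA_cons text lo hi t r []

theorem snapLoopA_eq_findA (text : String) (lo hi t : Int) (L : List Int) :
    snapLoopA text lo hi t L = (findA text lo hi t L).getD t := by
  induction L with
  | nil => rfl
  | cons r rest ih =>
    simp only [snapLoopA, findA]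
    split_ifs with h1 h2 <;> simp [ih]

theorem findA_append (text : String) (lo hi t : Int) (L1 L2 : List Int) :
    findA text lo hi t (L1 ++ L2) = (findA text lo hi t L1).or (findA text lo hi t L2) := by
  induction L1 with
  | nil => rfl
  | cons r rest ih =>
    simp only [List.cons_append, findA]
    split_ifs <;> simp [ih]

theorem scanB_cons_none (text : String) (t i : Int) (L : List Int) :
    snapScanB text t none (i :: L)
      = if isNaturalBreak text i = true then snapScanB text t (some i) L
        else snapScanB text t none L := by
  simp only [snapScanB]
  cases h : isNaturalBreak text i <;> simp [h]

theorem scanB_cons_some (text : String) (t b i : Int) (L : List Int) :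
    snapScanB text t (some b) (i :: L)
      = if isNaturalBreak text i = true ∧ (i - t).natAbs < (b - t).natAbs
        then snapScanB text t (some i) L
        else snapScanB text t (some b) L := by
  simp only [snapScanB]
  by_cases h1 : isNaturalBreak text i = true
  · by_cases h2 : (i - t).natAbs < (b - t).natAbs <;> simp [h1, h2]
  · simp [h1]

theorem scanB_none_singleton (text : String) (t i : Int) :
    snapScanB text t none [i] = if isNaturalBreak text i = true then some i else none := by
  rw [scanB_cons_none]
  split_ifs <;> rfl

theorem snapScanB_append (text : String) (t : Int) (best : Option Int) (L1 L2 : List Int) :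
    snapScanB text t best (L1 ++ L2) = snapScanB text t (snapScanB text t best L1) L2 := by
  induction L1 generalizing best with
  | nil => rfl
  | cons i rest ih =>
    simp only [List.cons_append, snapScanB]
    split_ifs <;> simp [ih]

theorem snapScanB_some_isSome (text : String) (t : Int) (x : Int) (L : List Int) :
    (snapScanB text t (some x) L).isSome := by
  induction L generalizing x with
  | nil => rfl
  | cons i rest ih =>
    simp only [snapScanB]
    split_ifs <;> simp [ih]

theorem snapScanB_mem (text : String) (t : Int) (best : Option Int) (L : List Int) (x : Int)
    (h : snapScanB text t best L = some x) : x ∈ L ∨ best = some x := by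
  induction L generalizing best with
  | nil => right; exact h
  | cons i rest ih =>
    simp only [snapScanB] at h
    split_ifs at h with hc
    · rcases ih _ h with h' | h'
      · exact Or.inl (List.mem_cons_of_mem _ h')
      · exact Or.inl (by simp [Option.some_inj.mp h'])
    · rcases ih _ h with h' | h'
      · exact Or.inl (List.mem_cons_of_mem _ h')
      · exact Or.inr h'

-- a seed farther from target than every break in L is returned only if L holds no break
theorem snapScanB_far_seed (text : String) (t a : Int) (L : List Int)
    (h : ∀ i ∈ L, isNaturalBreak text i = true → (i - t).natAbs < (a - t).natAbs) :
    snapScanB text t (some a) L = (snapScanB text t none L).or (some a) := by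
  induction L with
  | nil => rfl
  | cons i rest ih =>
    by_cases hP : isNaturalBreak text i = true
    · have hlt : (i - t).natAbs < (a - t).natAbs := h i (by simp) hP
      rw [scanB_cons_some, if_pos ⟨hP, hlt⟩, scanB_cons_none, if_pos hP]
      obtain ⟨y, hy⟩ := Option.isSome_iff_exists.mp (snapScanB_some_isSome text t i rest)
      rw [hy, Option.some_or]
    · rw [scanB_cons_some, if_neg (by tauto), scanB_cons_none, if_neg hP]
      exact ih (fun j hj => h j (List.mem_cons_of_mem _ hj))

-- distance bound for every result of the scan over a window around t
theorem snapScanB_none_bound (text : String) (t A B : Int) (w : Nat) (x : Int)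
    (hA : t - w ≤ A) (hB : B ≤ t + w)
    (h : snapScanB text t none (PySem.List.pyRange A (B + 1) 1) = some x) :
    (x - t).natAbs ≤ w := by
  rcases snapScanB_mem text t none _ x h with hx | hx
  · rw [PySem.List.mem_pyRange_one] at hx
    omega
  · exact absurd hx (by simp)

-- KEY LEMMA: the radial first-hit search over radii 0..w equals the ascending
-- closest-break scan over the window [max lo (t-w), min hi (t+w)]
theorem radial_eq_scan (text : String) (lo hi t : Int) (hlo : lo ≤ t) (hhi : t ≤ hi) :
    ∀ w : Nat,
      findA text lo hi t (PySem.List.pyRange 0 ((w : Int) + 1) 1)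
        = snapScanB text t none
            (PySem.List.pyRange (max lo (t - w)) (min hi (t + w) + 1) 1) := by
  intro w
  induction w with
  | zero =>
    simp only [Nat.cast_zero]
    have h1 : max lo (t - 0) = t := by omega
    have h2 : min hi (t + 0) = t := by omega
    rw [h1, h2, PySem.List.pyRange_one_singleton, PySem.List.pyRange_one_singleton,
        findA_singleton, scanB_none_singleton]
    by_cases hPt : isNaturalBreak text t = true <;> simp [hPt, hlo, hhi]
  | succ w ih =>
    set A := max lo (t - (w:Int)) with hAdef
    set B := min hi (t + (w:Int)) with hBdef
    set A' := max lo (t - ((w:Int) + 1)) with hA'def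
    set B' := min hi (t + ((w:Int) + 1)) with hB'def
    have hcast : ((w + 1 : Nat) : Int) = (w : Int) + 1 := by push_cast; ring
    rw [hcast]
    -- LHS: split off the last radius w+1
    rw [PySem.List.pyRange_one_succ_right (by positivity), findA_append]
    -- RHS: split the window into left-extension ++ middle ++ right-extension
    rw [show PySem.List.pyRange A' (B' + 1) 1
          = PySem.List.pyRange A' A 1 ++ PySem.List.pyRange A (B + 1) 1
              ++ PySem.List.pyRange (B + 1) (B' + 1) 1 from by
        rw [← PySem.List.pyRange_one_append A' A (B + 1) (by omega) (by omega),
            ← PySem.List.pyRange_one_append A' (B + 1) (B' + 1) (by omega) (by omega)],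
      snapScanB_append, snapScanB_append]
    -- the right extension is [t+(w+1)] (if within hi) and never displaces a
    -- result at distance ≤ w+1
    have hRscan : ∀ s : Option Int, (∀ x, s = some x → (x - t).natAbs ≤ w + 1) →
        snapScanB text t s (PySem.List.pyRange (B + 1) (B' + 1) 1)
          = s.or (if t + ((w:Int) + 1) ≤ hi ∧ isNaturalBreak text (t + ((w:Int) + 1)) = true
                  then some (t + ((w:Int) + 1)) else none) := by
      intro s hs
      by_cases hRext : t + ((w:Int) + 1) ≤ hi
      · have hrange : PySem.List.pyRange (B + 1) (B' + 1) 1 = [t + ((w:Int) + 1)] := by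
          have hB'val : B' = B + 1 := by omega
          have hBval : B + 1 = t + ((w:Int) + 1) := by omega
          rw [hB'val, PySem.List.pyRange_one_singleton, hBval]
        rw [hrange]
        cases s with
        | none =>
          rw [scanB_none_singleton, Option.none_or]
          by_cases hPb : isNaturalBreak text (t + ((w:Int) + 1)) = true <;>
            simp [hPb, hRext]
        | some x =>
          have hx : (x - t).natAbs ≤ w + 1 := hs x rfl
          rw [scanB_cons_some, if_neg (by rintro ⟨-, hlt⟩; omega), Option.some_or]
          rfl
      · have hB'val : B' = B := by omega
        rw [hB'val, PySem.List.pyRange_one_eq_nil (by omega),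
            if_neg (by tauto)]
        cases s <;> rfl
    have hmid_bound : ∀ x,
        snapScanB text t none (PySem.List.pyRange A (B + 1) 1) = some x →
          (x - t).natAbs ≤ w :=
      fun x hx => snapScanB_none_bound text t A B w x (by omega) (by omega) hx
    -- the left extension is [t-(w+1)] (if within lo) or empty
    by_cases hLext : lo ≤ t - ((w:Int) + 1)
    · have hlexteq : PySem.List.pyRange A' A 1 = [t - ((w:Int) + 1)] := by
        have hA'val : A' = t - ((w:Int) + 1) := by omega
        have hAval : A = A' + 1 := by omega
        rw [hAval, PySem.List.pyRange_one_singleton, hA'val]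
      rw [hlexteq, scanB_none_singleton]
      by_cases hPa : isNaturalBreak text (t - ((w:Int) + 1)) = true
      · rw [if_pos hPa,
            snapScanB_far_seed text t (t - ((w:Int) + 1)) (PySem.List.pyRange A (B + 1) 1)
              (by intro i hi _; rw [PySem.List.mem_pyRange_one] at hi; omega),
            ← ih,
            findA_singleton, if_pos ⟨hLext, hPa⟩]
        rw [hRscan _ (by
          intro x hx
          cases hF : findA text lo hi t (PySem.List.pyRange 0 ((w:Int) + 1) 1) with
          | none =>
            rw [hF, Option.none_or] at hx
            have := Option.some_inj.mp hx
            omega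
          | some y =>
            rw [hF, Option.some_or] at hx
            have hxy := Option.some_inj.mp hx
            have hb := hmid_bound y (by rw [← ih]; exact hF)
            omega)]
        cases hF : findA text lo hi t (PySem.List.pyRange 0 ((w:Int) + 1) 1) with
        | none => rw [Option.none_or, Option.some_or]
        | some y => rw [Option.some_or, Option.some_or]
      · rw [if_neg hPa, ← ih,
            hRscan _ (fun x hx => le_trans (hmid_bound x (by rw [← ih]; exact hx)) (by omega)),
            findA_singleton, if_neg (by tauto)]
    · have hA'val : A' = A := by omega
      rw [hA'val, PySem.List.pyRange_one_eq_nil (le_refl A),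
          show snapScanB text t none ([] : List Int) = none from rfl, ← ih,
          hRscan _ (fun x hx => le_trans (hmid_bound x (by rw [← ih]; exact hx)) (by omega)),
          findA_singleton, if_neg (by tauto)]

-- ===== VERDICT (by name: the statement is the Claim_ definition above) =====
theorem snap_split_index_py_spec : Claim_equal_snap_split_index_py := by
  intro text target start _hDom _hPre
  simp only [Spec_snap_split_index_py, snap_split_index_py, snap_split_index_py_alt]
  split_ifs with h1 h2
  · rfl
  · rfl
  · set n := PySem.Str.len text with hn
    set t := max (start + 1) (min target (n - 1)) with ht
    have hlo : start + 1 ≤ t := le_max_left _ _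
    have hhi : t ≤ n - 1 := by omega
    rw [snapLoopA_eq_findA]
    have key := radial_eq_scan text (start + 1) (n - 1) t hlo hhi 120
    rw [show ((120 : Nat) : Int) = (120 : Int) from by norm_num] at key
    rw [key]
    cases hS : snapScanB text t none
        (PySem.List.pyRange (max (start + 1) (t - 120)) (min (n - 1) (t + 120) + 1) 1) with
    | none => simp
    | some b => simp
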